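-- pv_equiv track=rewrite | github.com/EllisDijkstra11/Advent-of-Code | 2022/day14/day14.py | get_outside_rocks
-- ===== SOURCE A (Python) =====
-- def get_outside_rocks(all_rocks):
--     left = 500
--     right = 500
--     lowest = 0
--     for rock in all_rocks:
--         if rock[0] < left:
--             left = rock[0]
--         elif rock[0] > right:
--             right = rock[0]
--
--         if rock[1] > lowest:
--             lowest = rock[1]
--
--     return left, right, lowest
-- ===== SOURCE B (Python) =====
-- def get_outside_rocks(all_rocks):
--     xs = sorted([500] + [r[0] for r in all_rocks])
--     ys = sorted([0] + [r[1] for r in all_rocks])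
--     return xs[0], xs[-1], ys[-1]
-- ===== Notes on version B (the rewrite author's own statement) =====
-- stated objective: alternative
-- what changed: Replaces A's single running-extrema loop by sort-then-pick: sort the x-coordinates with the 500 seed and take the first/last elements as left/right, sort the y-coordinates with the 0 seed and take the last as lowest; correct because A's elif is inert (left<=500<=right always) so A computes exactly these extrema.
import Mathlib
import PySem

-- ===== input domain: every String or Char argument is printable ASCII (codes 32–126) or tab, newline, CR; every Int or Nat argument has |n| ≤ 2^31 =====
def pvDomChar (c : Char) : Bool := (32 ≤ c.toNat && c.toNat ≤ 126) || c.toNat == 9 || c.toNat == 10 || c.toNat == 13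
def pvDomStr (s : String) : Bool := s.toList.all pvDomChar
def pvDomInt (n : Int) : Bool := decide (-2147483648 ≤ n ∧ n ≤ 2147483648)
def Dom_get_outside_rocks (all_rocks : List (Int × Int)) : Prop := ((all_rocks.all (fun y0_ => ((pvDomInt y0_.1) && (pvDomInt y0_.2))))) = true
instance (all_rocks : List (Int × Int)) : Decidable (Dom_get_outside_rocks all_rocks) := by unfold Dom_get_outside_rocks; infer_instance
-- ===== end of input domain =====

-- B replaces A's running-extrema loop by sort-then-pick: sort the seeded coordinate
-- lists and read off first/last elements; alternative decomposition, not faster.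

-- ===== PORT A =====
def get_outside_rocks (all_rocks : List (Int × Int)) : Int × Int × Int :=
  all_rocks.foldl
    (fun s rock =>
      let lr : Int × Int :=
        if rock.1 < s.1 then (rock.1, s.2.1)
        else if rock.1 > s.2.1 then (s.1, rock.1)
        else (s.1, s.2.1)
      let low : Int := if rock.2 > s.2.2 then rock.2 else s.2.2
      (lr.1, lr.2, low))
    (500, 500, 0)

-- ===== PORT B =====
def get_outside_rocks_alt (all_rocks : List (Int × Int)) : Int × Int × Int :=
  -- xs = sorted([500] + x-projections), ys = sorted([0] + y-projections);
  -- xs[0]/xs[-1]/ys[-1] via pyGet?; the none branch is unreachable (lists nonempty)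
  (match PySem.List.pyGet? (PySem.List.sorted ((500 : Int) :: all_rocks.map (fun r => r.1)) (fun v => v) false) 0 with
    | some v => v | none => 0,
   match PySem.List.pyGet? (PySem.List.sorted ((500 : Int) :: all_rocks.map (fun r => r.1)) (fun v => v) false) (-1) with
    | some v => v | none => 0,
   match PySem.List.pyGet? (PySem.List.sorted ((0 : Int) :: all_rocks.map (fun r => r.2)) (fun v => v) false) (-1) with
    | some v => v | none => 0)

-- ===== PRECONDITION & SPEC =====
def Spec_get_outside_rocks (all_rocks : List (Int × Int)) (out : Int × Int × Int) : Prop := out = get_outside_rocks_alt all_rocks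
instance (all_rocks : List (Int × Int)) (out : Int × Int × Int) : Decidable (Spec_get_outside_rocks all_rocks out) := by unfold Spec_get_outside_rocks; infer_instance

-- ===== CLAIM =====
def Claim_equal_get_outside_rocks : Prop := ∀ (all_rocks : List (Int × Int)), Dom_get_outside_rocks all_rocks → Spec_get_outside_rocks all_rocks (get_outside_rocks all_rocks)

-- ===== LEMMAS AND PROOFS =====

theorem foldl_min_eq_of (xs : List Int) : ∀ (a h : Int), (h = a ∨ h ∈ xs) →
    h ≤ a → (∀ y ∈ xs, h ≤ y) → xs.foldl min a = h := by
  induction xs with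
  | nil =>
      intro a h hmem hle _
      rcases hmem with rfl | hm
      · rfl
      · cases hm
  | cons x t ih =>
      intro a h hmem hle hall
      simp only [List.foldl_cons]
      have hx : h ≤ x := hall x (List.mem_cons_self ..)
      have hall' : ∀ y ∈ t, h ≤ y := fun y hy => hall y (List.mem_cons_of_mem _ hy)
      rcases hmem with rfl | hm
      · exact ih (min h x) h (Or.inl (by omega)) (by omega) hall'
      · rcases List.mem_cons.mp hm with rfl | hmt
        · exact ih (min a h) h (Or.inl (by omega)) (by omega) hall'
        · exact ih (min a x) h (Or.inr hmt) (by omega) hall'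

theorem foldl_max_eq_of (xs : List Int) : ∀ (a h : Int), (h = a ∨ h ∈ xs) →
    a ≤ h → (∀ y ∈ xs, y ≤ h) → xs.foldl max a = h := by
  induction xs with
  | nil =>
      intro a h hmem hle _
      rcases hmem with rfl | hm
      · rfl
      · cases hm
  | cons x t ih =>
      intro a h hmem hle hall
      simp only [List.foldl_cons]
      have hx : x ≤ h := hall x (List.mem_cons_self ..)
      have hall' : ∀ y ∈ t, y ≤ h := fun y hy => hall y (List.mem_cons_of_mem _ hy)
      rcases hmem with rfl | hm
      · exact ih (max h x) h (Or.inl (by omega)) (by omega) hall'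
      · rcases List.mem_cons.mp hm with rfl | hmt
        · exact ih (max a h) h (Or.inl (by omega)) (by omega) hall'
        · exact ih (max a x) h (Or.inr hmt) (by omega) hall'

theorem pairwise_le_getLast : ∀ (l : List Int) (M : Int), l.Pairwise (· ≤ ·) →
    l.getLast? = some M → M ∈ l ∧ ∀ y ∈ l, y ≤ M := by
  intro l
  induction l with
  | nil => intro M _ h; cases h
  | cons h t ih =>
      intro M hpw hlast
      cases t with
      | nil =>
          simp only [List.getLast?_singleton, Option.some.injEq] at hlast
          subst hlast
          exact ⟨List.mem_singleton_self _, by intro y hy; simp at hy; omega⟩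
      | cons x s =>
          rw [List.getLast?_cons_cons] at hlast
          have hpw' := (List.pairwise_cons.mp hpw).2
          have hhd := (List.pairwise_cons.mp hpw).1
          obtain ⟨hmem, hall⟩ := ih M hpw' hlast
          refine ⟨List.mem_cons_of_mem _ hmem, ?_⟩
          intro y hy
          rcases List.mem_cons.mp hy with rfl | hyt
          · exact le_trans (hhd M hmem) (le_refl _)
          · exact hall y hyt

-- first element of sorted (a :: xs) equals xs.foldl min a
theorem head_sorted_eq_foldl_min (a : Int) (xs : List Int) :
    (match PySem.List.pyGet? (PySem.List.sorted (a :: xs) (fun v => v) false) 0 with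
      | some v => v | none => 0) = xs.foldl min a := by
  set s := PySem.List.sorted (a :: xs) (fun v => v) false with hs
  have hne : s ≠ [] := by
    intro h
    exact (List.cons_ne_nil a xs) ((PySem.List.sorted_eq_nil_iff (a :: xs) (fun v => v) false).mp (hs ▸ h))
  obtain ⟨h, t, hst⟩ := List.exists_cons_of_ne_nil hne
  rw [hst, PySem.List.pyGet?_zero_cons]
  have hmem : h ∈ a :: xs := by
    rw [← PySem.List.mem_sorted (a :: xs) (fun v => v) false, ← hs, hst]
    exact List.mem_cons_self ..
  have hle : ∀ y ∈ a :: xs, h ≤ y :=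
    PySem.List.key_head_sorted_le (a :: xs) (fun v => v) (hs ▸ hst)
  have := foldl_min_eq_of xs a h (List.mem_cons.mp hmem)
    (hle a (List.mem_cons_self ..)) (fun y hy => hle y (List.mem_cons_of_mem _ hy))
  simpa using this.symm

-- last element of sorted (a :: xs) equals xs.foldl max a
theorem last_sorted_eq_foldl_max (a : Int) (xs : List Int) :
    (match PySem.List.pyGet? (PySem.List.sorted (a :: xs) (fun v => v) false) (-1) with
      | some v => v | none => 0) = xs.foldl max a := by
  set s := PySem.List.sorted (a :: xs) (fun v => v) false with hs
  have hne : s ≠ [] := by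
    intro h
    exact (List.cons_ne_nil a xs) ((PySem.List.sorted_eq_nil_iff (a :: xs) (fun v => v) false).mp (hs ▸ h))
  rw [PySem.List.pyGet?_neg_one]
  obtain ⟨M, hM⟩ := Option.isSome_iff_exists.mp (List.getLast?_isSome.mpr hne)
  rw [hM]
  have hpw : s.Pairwise (fun x y => x ≤ y) := by
    simpa using PySem.List.sorted_pairwise (a :: xs) (fun v => v)
  obtain ⟨hmem, hall⟩ := pairwise_le_getLast s M hpw hM
  have hmem' : M ∈ a :: xs := (PySem.List.mem_sorted (a :: xs) (fun v => v) false M).mp (hs ▸ hmem)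
  have hall' : ∀ y ∈ a :: xs, y ≤ M := by
    intro y hy
    exact hall y ((PySem.List.mem_sorted (a :: xs) (fun v => v) false y).mpr hy)
  have := foldl_max_eq_of xs a M (List.mem_cons.mp hmem')
    (hall' a (List.mem_cons_self ..)) (fun y hy => hall' y (List.mem_cons_of_mem _ hy))
  simpa using this.symm

-- A's fused loop computes the three independent extrema
theorem foldA_eq (rocks : List (Int × Int)) : ∀ (L R Y : Int), L ≤ R →
    rocks.foldl
      (fun s rock =>
        let lr : Int × Int :=
          if rock.1 < s.1 then (rock.1, s.2.1)
          else if rock.1 > s.2.1 then (s.1, rock.1)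
          else (s.1, s.2.1)
        let low : Int := if rock.2 > s.2.2 then rock.2 else s.2.2
        (lr.1, lr.2, low))
      (L, R, Y)
    = ((rocks.map (fun r => r.1)).foldl min L,
       (rocks.map (fun r => r.1)).foldl max R,
       (rocks.map (fun r => r.2)).foldl max Y) := by
  induction rocks with
  | nil => intro L R Y _; rfl
  | cons rock t ih =>
      intro L R Y hLR
      simp only [List.foldl_cons, List.map_cons]
      have hstep : ((if rock.1 < L then (rock.1, R)
            else if rock.1 > R then (L, rock.1) else (L, R)) : Int × Int)
            = (min L rock.1, max R rock.1) := by
        split_ifs with h1 h2 <;>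
          simp [min_def, max_def] <;> omega
      have hlow : (if rock.2 > Y then rock.2 else Y) = max Y rock.2 := by
        simp [max_def]; omega
      simp only [hstep, hlow]
      rw [ih (min L rock.1) (max R rock.1) (max Y rock.2)
            (le_trans (min_le_left _ _) (le_trans hLR (le_max_left _ _)))]

-- ===== VERDICT =====
theorem get_outside_rocks_spec : Claim_equal_get_outside_rocks := by
  intro all_rocks _
  unfold Spec_get_outside_rocks get_outside_rocks get_outside_rocks_alt
  rw [foldA_eq all_rocks 500 500 0 (by norm_num)]
  rw [head_sorted_eq_foldl_min, last_sorted_eq_foldl_max, last_sorted_eq_foldl_max]
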